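-- pv_equiv track=rewrite | github.com/MatteoCaldana/competitive-programming | foo-bar-challenge/lvl3-pt1.py | find_thin_walls
-- ===== SOURCE A (Python) =====
-- def find_thin_walls(mm):
--     rows, cols = len(mm), len(mm[0])
--     thin_walls = []
--     for i in range(rows):
--         for j in range(cols):
--             if mm[i][j] == 1:
--                 surroundings = 0
--                 for dx, dy in [(0,1),(1,0),(-1,0),(0,-1)]:
--                     x, y = i + dx, j + dy
--                     if (x >= 0 and x < rows and y >= 0 and y < cols) and (mm[x][y] == 0):
--                        surroundings += 1
--                 if surroundings > 1:
--                     thin_walls.append((i,j))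
--     return thin_walls
-- ===== SOURCE B (Python) =====
-- def find_thin_walls(mm):
--     rows, cols = len(mm), len(mm[0])
--     count = {}
--     # horizontal adjacent pairs: credit the 1-cell of each 1/0 pair
--     for i in range(rows):
--         for j in range(cols - 1):
--             a, b = mm[i][j], mm[i][j + 1]
--             if a == 1 and b == 0:
--                 count[(i, j)] = count.get((i, j), 0) + 1
--             elif a == 0 and b == 1:
--                 count[(i, j + 1)] = count.get((i, j + 1), 0) + 1
--     # vertical adjacent pairs
--     for i in range(rows - 1):
--         for j in range(cols):
--             a, b = mm[i][j], mm[i + 1][j]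
--             if a == 1 and b == 0:
--                 count[(i, j)] = count.get((i, j), 0) + 1
--             elif a == 0 and b == 1:
--                 count[(i + 1, j)] = count.get((i + 1, j), 0) + 1
--     return [(i, j) for i in range(rows) for j in range(cols)
--             if mm[i][j] == 1 and count.get((i, j), 0) > 1]
-- ===== Notes on version B (the rewrite author's own statement) =====
-- stated objective: alternative
-- what changed: Replaced the per-cell 4-direction neighbor scan with two sweeps over adjacent pairs (horizontal, then vertical) that accumulate a neighbor-count dictionary keyed by the wall cell, followed by a row-major filter pass.
import Mathlib
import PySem

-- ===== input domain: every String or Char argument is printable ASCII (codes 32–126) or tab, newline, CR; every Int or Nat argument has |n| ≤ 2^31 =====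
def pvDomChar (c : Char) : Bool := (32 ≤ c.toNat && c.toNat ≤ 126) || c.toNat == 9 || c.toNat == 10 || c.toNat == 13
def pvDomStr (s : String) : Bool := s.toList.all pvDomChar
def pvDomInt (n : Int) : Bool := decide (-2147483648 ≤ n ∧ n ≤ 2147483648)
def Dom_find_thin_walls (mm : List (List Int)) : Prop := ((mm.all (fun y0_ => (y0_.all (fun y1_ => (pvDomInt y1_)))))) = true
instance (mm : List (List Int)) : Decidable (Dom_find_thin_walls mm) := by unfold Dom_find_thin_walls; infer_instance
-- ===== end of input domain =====

-- B replaces A's per-cell scan over the four directions by two sweeps over adjacent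
-- pairs (horizontal, then vertical) accumulating a neighbor-count dictionary, then a
-- row-major filter pass; same cost, different decomposition (objective: alternative).

-- mm[x][y] for in-range nonnegative indices (both programs guard the indices themselves)
def pvCell (mm : List (List Int)) (x y : Int) : Int :=
  PySem.List.pyGetD (PySem.List.pyGetD mm x []) y 0

-- ===== PORT A =====
def find_thin_walls (mm : List (List Int)) : List (Int × Int) :=
  let rows : Int := mm.length
  let cols : Int := (PySem.List.pyGetD mm 0 []).length
  (PySem.List.pyRange 0 rows 1).foldl (fun acc i =>
    (PySem.List.pyRange 0 cols 1).foldl (fun acc j =>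
      if pvCell mm i j = 1 then
        let s : Int := [((0:Int),(1:Int)),(1,0),(-1,0),(0,-1)].foldl (fun s d =>
          let x := i + d.1
          let y := j + d.2
          if (0 ≤ x ∧ x < rows ∧ 0 ≤ y ∧ y < cols) ∧ pvCell mm x y = 0 then s + 1 else s) 0
        if s > 1 then acc ++ [(i, j)] else acc
      else acc) acc) []

-- ===== PORT B =====
def find_thin_walls_alt (mm : List (List Int)) : List (Int × Int) :=
  let rows : Int := mm.length
  let cols : Int := (PySem.List.pyGetD mm 0 []).length
  let c1 : PySem.Dict (Int × Int) Int :=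
    (PySem.List.pyRange 0 rows 1).foldl (fun c i =>
      (PySem.List.pyRange 0 (cols - 1) 1).foldl (fun c j =>
        let a := pvCell mm i j
        let b := pvCell mm i (j + 1)
        if a = 1 ∧ b = 0 then c.modify (i, j) 0 (· + 1)
        else if a = 0 ∧ b = 1 then c.modify (i, j + 1) 0 (· + 1)
        else c) c) PySem.Dict.empty
  let c2 : PySem.Dict (Int × Int) Int :=
    (PySem.List.pyRange 0 (rows - 1) 1).foldl (fun c i =>
      (PySem.List.pyRange 0 cols 1).foldl (fun c j =>
        let a := pvCell mm i j
        let b := pvCell mm (i + 1) j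
        if a = 1 ∧ b = 0 then c.modify (i, j) 0 (· + 1)
        else if a = 0 ∧ b = 1 then c.modify (i + 1, j) 0 (· + 1)
        else c) c) c1
  (PySem.List.pyRange 0 rows 1).foldl (fun acc i =>
    (PySem.List.pyRange 0 cols 1).foldl (fun acc j =>
      if pvCell mm i j = 1 ∧ c2.getD (i, j) 0 > 1 then acc ++ [(i, j)] else acc) acc) []

-- ===== PRECONDITION & SPEC =====
-- Pre_ excludes exactly the inputs where the Python raises IndexError: the empty grid
-- (len(mm[0])) and grids with a row shorter than len(mm[0]).
def Pre_find_thin_walls (mm : List (List Int)) : Prop :=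
  mm ≠ [] ∧ ∀ row ∈ mm, (PySem.List.pyGetD mm 0 []).length ≤ row.length
instance (mm : List (List Int)) : Decidable (Pre_find_thin_walls mm) := by
  unfold Pre_find_thin_walls; infer_instance
def pvWitness_find_thin_walls : List (List Int) := [[1, 0], [0, 1]]

def Spec_find_thin_walls (mm : List (List Int)) (out : List (Int × Int)) : Prop := out = find_thin_walls_alt mm
instance (mm : List (List Int)) (out : List (Int × Int)) : Decidable (Spec_find_thin_walls mm out) := by unfold Spec_find_thin_walls; infer_instance

-- ===== CLAIM (what is proved, stated in full; the proofs are below) =====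
def Claim_equal_find_thin_walls : Prop := ∀ (mm : List (List Int)), Dom_find_thin_walls mm → Pre_find_thin_walls mm → Spec_find_thin_walls mm (find_thin_walls mm)

-- ===== LEMMAS AND PROOFS =====

-- the row-major list of index pairs both programs sweep
def pvPairs (R C : Int) : List (Int × Int) :=
  (PySem.List.pyRange 0 R 1) ×ˢ (PySem.List.pyRange 0 C 1)

-- A's inner 4-direction loop, exactly as it appears inside port A
def pvSurr (mm : List (List Int)) (R C i j : Int) : Int :=
  [((0:Int),(1:Int)),(1,0),(-1,0),(0,-1)].foldl (fun s d =>
    let x := i + d.1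
    let y := j + d.2
    if (0 ≤ x ∧ x < R ∧ 0 ≤ y ∧ y < C) ∧ pvCell mm x y = 0 then s + 1 else s) 0

-- the event of a horizontal (resp. vertical) pair-sweep step of B: which key gets credited
def pvEvtH (mm : List (List Int)) (p : Int × Int) : Option (Int × Int) :=
  if pvCell mm p.1 p.2 = 1 ∧ pvCell mm p.1 (p.2 + 1) = 0 then some p
  else if pvCell mm p.1 p.2 = 0 ∧ pvCell mm p.1 (p.2 + 1) = 1 then some (p.1, p.2 + 1)
  else none

def pvEvtV (mm : List (List Int)) (p : Int × Int) : Option (Int × Int) :=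
  if pvCell mm p.1 p.2 = 1 ∧ pvCell mm (p.1 + 1) p.2 = 0 then some p
  else if pvCell mm p.1 p.2 = 0 ∧ pvCell mm (p.1 + 1) p.2 = 1 then some (p.1 + 1, p.2)
  else none

-- the dict built by port B's two pair sweeps (lets zeta-reduced)
def pvDictB (mm : List (List Int)) (R C : Int) : PySem.Dict (Int × Int) Int :=
  (PySem.List.pyRange 0 (R - 1) 1).foldl (fun c i =>
    (PySem.List.pyRange 0 C 1).foldl (fun c j =>
      if pvCell mm i j = 1 ∧ pvCell mm (i + 1) j = 0 then c.modify (i, j) 0 (· + 1)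
      else if pvCell mm i j = 0 ∧ pvCell mm (i + 1) j = 1 then c.modify (i + 1, j) 0 (· + 1)
      else c) c)
    ((PySem.List.pyRange 0 R 1).foldl (fun c i =>
      (PySem.List.pyRange 0 (C - 1) 1).foldl (fun c j =>
        if pvCell mm i j = 1 ∧ pvCell mm i (j + 1) = 0 then c.modify (i, j) 0 (· + 1)
        else if pvCell mm i j = 0 ∧ pvCell mm i (j + 1) = 1 then c.modify (i, j + 1) 0 (· + 1)
        else c) c) PySem.Dict.empty)

lemma mem_pvPairs {R C : Int} {p : Int × Int} :
    p ∈ pvPairs R C ↔ (0 ≤ p.1 ∧ p.1 < R) ∧ (0 ≤ p.2 ∧ p.2 < C) := by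
  cases p with | mk a b => simp [pvPairs, List.mem_product, PySem.List.mem_pyRange_one]

lemma nodup_pvPairs (R C : Int) : (pvPairs R C).Nodup :=
  (PySem.List.nodup_pyRange_one ..).product (PySem.List.nodup_pyRange_one ..)

-- a nested foldl over two ranges is a foldl over the product list
lemma foldl_nested {γ : Type} (f : γ → Int → Int → γ) (xs ys : List Int) (c : γ) :
    xs.foldl (fun c i => ys.foldl (fun c j => f c i j) c) c
      = (xs ×ˢ ys).foldl (fun c p => f c p.1 p.2) c := by
  induction xs generalizing c with
  | nil => rfl
  | cons a xs ih => simp [List.product_cons, List.foldl_append, List.foldl_map, ih]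

-- folding conditional counter increments: the final count at v counts the events hitting v
lemma getD_foldl_evt (f : Int × Int → Option (Int × Int)) (l : List (Int × Int))
    (c : PySem.Dict (Int × Int) Int) (v : Int × Int) :
    (l.foldl (fun c p => match f p with
        | some k => c.modify k (0:Int) (· + 1)
        | none => c) c).getD v 0
      = c.getD v 0 + (l.countP (fun p => f p == some v) : Int) := by
  induction l generalizing c with
  | nil => simp
  | cons a l ih =>
    rw [List.foldl_cons, List.countP_cons, ih]
    cases h : f a with
    | none => simp
    | some k =>
      rw [PySem.Dict.getD_modify]
      by_cases hk : v = k
      · subst hk; simp; ring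
      · simp [hk, Ne.symm hk]

-- counting a predicate that can only hold at two fixed distinct elements of a Nodup list
lemma countP_pair {α : Type} [DecidableEq α] (l : List α) (hl : l.Nodup) (P : α → Bool)
    (u v : α) (huv : u ≠ v) (h : ∀ p, P p = true → p = u ∨ p = v) :
    l.countP P = (if u ∈ l ∧ P u then 1 else 0) + (if v ∈ l ∧ P v then 1 else 0) := by
  induction l with
  | nil => simp
  | cons a l ih =>
    have ha := (List.nodup_cons.mp hl).1
    rw [List.countP_cons, ih (List.nodup_cons.mp hl).2]
    have hA := h a
    clear h ih hl
    by_cases h1 : P a = true <;> by_cases h2 : u = a <;> by_cases h3 : v = a <;>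
      by_cases h4 : u ∈ l <;> by_cases h5 : v ∈ l <;>
      by_cases h6 : P u = true <;> by_cases h7 : P v = true <;>
      simp_all [List.mem_cons] <;> tauto

-- port B's two sweeps, written with the event functions over the product lists
lemma pvDictB_eq_evt (mm : List (List Int)) (R C : Int) :
    pvDictB mm R C =
      (pvPairs (R - 1) C).foldl (fun c p => match pvEvtV mm p with
          | some k => c.modify k (0:Int) (· + 1)
          | none => c)
        ((pvPairs R (C - 1)).foldl (fun c p => match pvEvtH mm p with
          | some k => c.modify k (0:Int) (· + 1)
          | none => c) PySem.Dict.empty) := by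
  unfold pvDictB pvPairs
  rw [foldl_nested (f := fun (c : PySem.Dict (Int × Int) Int) (i j : Int) =>
        if pvCell mm i j = 1 ∧ pvCell mm i (j + 1) = 0 then c.modify (i, j) (0:Int) (· + 1)
        else if pvCell mm i j = 0 ∧ pvCell mm i (j + 1) = 1 then c.modify (i, j + 1) (0:Int) (· + 1)
        else c)]
  rw [foldl_nested (f := fun (c : PySem.Dict (Int × Int) Int) (i j : Int) =>
        if pvCell mm i j = 1 ∧ pvCell mm (i + 1) j = 0 then c.modify (i, j) (0:Int) (· + 1)
        else if pvCell mm i j = 0 ∧ pvCell mm (i + 1) j = 1 then c.modify (i + 1, j) (0:Int) (· + 1)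
        else c)]
  congr 1
  · funext c p
    unfold pvEvtV
    split_ifs <;> rfl
  · congr 1
    funext c p
    unfold pvEvtH
    split_ifs <;> rfl

-- B's neighbor count at an in-range wall cell, as a sum of the four direction indicators
lemma getD_pvDictB (mm : List (List Int)) (R C i j : Int)
    (hi : 0 ≤ i) (hiR : i < R) (hj : 0 ≤ j) (hjC : j < C)
    (hcell : pvCell mm i j = 1) :
    (pvDictB mm R C).getD (i, j) 0 =
      (if j + 1 < C ∧ pvCell mm i (j + 1) = 0 then 1 else 0)
      + (if i + 1 < R ∧ pvCell mm (i + 1) j = 0 then 1 else 0)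
      + (if 0 ≤ i - 1 ∧ pvCell mm (i - 1) j = 0 then 1 else 0)
      + (if 0 ≤ j - 1 ∧ pvCell mm i (j - 1) = 0 then 1 else 0) := by
  rw [pvDictB_eq_evt, getD_foldl_evt, getD_foldl_evt, PySem.Dict.getD_empty]
  rw [countP_pair (pvPairs R (C - 1)) (nodup_pvPairs ..) _ (i, j) (i, j - 1)
        (by intro h; have := congrArg Prod.snd h; simp at this; omega)
        (by
          intro p hp
          unfold pvEvtH at hp
          split_ifs at hp with h1 h2
          · left; simpa using hp.symm
          · right
            have hpe : (p.1, p.2 + 1) = ((i : Int), (j : Int)) := by simpa using hp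
            have h1 : p.1 = i := congrArg Prod.fst hpe
            have h2 : p.2 + 1 = j := congrArg Prod.snd hpe
            have : p = (p.1, p.2) := rfl
            rw [this, h1]
            have : p.2 = j - 1 := by omega
            rw [this]
          · simp at hp)]
  rw [countP_pair (pvPairs (R - 1) C) (nodup_pvPairs ..) _ (i, j) (i - 1, j)
        (by intro h; have := congrArg Prod.fst h; simp at this; omega)
        (by
          intro p hp
          unfold pvEvtV at hp
          split_ifs at hp with h1 h2
          · left; simpa using hp.symm
          · right
            have hpe : (p.1 + 1, p.2) = ((i : Int), (j : Int)) := by simpa using hp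
            have h1 : p.1 + 1 = i := congrArg Prod.fst hpe
            have h2 : p.2 = j := congrArg Prod.snd hpe
            have : p = (p.1, p.2) := rfl
            rw [this, h2]
            have : p.1 = i - 1 := by omega
            rw [this]
          · simp at hp)]
  -- evaluate the four membership/predicate conditions
  have m1 : ((i, j) ∈ pvPairs R (C - 1) ∧ (pvEvtH mm (i, j) == some (i, j)) = true)
      ↔ (j + 1 < C ∧ pvCell mm i (j + 1) = 0) := by
    rw [mem_pvPairs]
    unfold pvEvtH
    constructor
    · rintro ⟨hm, hp⟩
      refine ⟨by omega, ?_⟩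
      by_cases hc : pvCell mm i (j + 1) = 0
      · exact hc
      · exact absurd hp (by simp [hcell, hc])
    · rintro ⟨hb, hc⟩
      refine ⟨⟨⟨hi, hiR⟩, ⟨hj, by omega⟩⟩, ?_⟩
      simp [hcell, hc]
  have m2 : ((i, j - 1) ∈ pvPairs R (C - 1) ∧ (pvEvtH mm (i, j - 1) == some (i, j)) = true)
      ↔ (0 ≤ j - 1 ∧ pvCell mm i (j - 1) = 0) := by
    rw [mem_pvPairs]
    unfold pvEvtH
    constructor
    · rintro ⟨hm, hp⟩
      refine ⟨by simp at hm; omega, ?_⟩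
      simp only at hp
      have hj1 : j - 1 + 1 = j := by omega
      rw [hj1] at hp
      by_cases hc : pvCell mm i (j - 1) = 0
      · exact hc
      · exfalso
        split_ifs at hp with h1 h2
        · simp at hp
        · exact hc h2.1
        · simp at hp
    · rintro ⟨hb, hc⟩
      have hj1 : j - 1 + 1 = j := by omega
      refine ⟨⟨⟨hi, hiR⟩, ⟨hb, by omega⟩⟩, ?_⟩
      simp only [hj1]
      rw [if_neg (by simp [hcell]), if_pos ⟨hc, hcell⟩]
      simp
  have m3 : ((i, j) ∈ pvPairs (R - 1) C ∧ (pvEvtV mm (i, j) == some (i, j)) = true)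
      ↔ (i + 1 < R ∧ pvCell mm (i + 1) j = 0) := by
    rw [mem_pvPairs]
    unfold pvEvtV
    constructor
    · rintro ⟨hm, hp⟩
      refine ⟨by simp at hm; omega, ?_⟩
      by_cases hc : pvCell mm (i + 1) j = 0
      · exact hc
      · exact absurd hp (by simp [hcell, hc])
    · rintro ⟨hb, hc⟩
      refine ⟨⟨⟨hi, by omega⟩, ⟨hj, hjC⟩⟩, ?_⟩
      simp [hcell, hc]
  have m4 : ((i - 1, j) ∈ pvPairs (R - 1) C ∧ (pvEvtV mm (i - 1, j) == some (i, j)) = true)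
      ↔ (0 ≤ i - 1 ∧ pvCell mm (i - 1) j = 0) := by
    rw [mem_pvPairs]
    unfold pvEvtV
    constructor
    · rintro ⟨hm, hp⟩
      refine ⟨by simp at hm; omega, ?_⟩
      simp only at hp
      have hi1 : i - 1 + 1 = i := by omega
      rw [hi1] at hp
      by_cases hc : pvCell mm (i - 1) j = 0
      · exact hc
      · exfalso
        split_ifs at hp with h1 h2
        · simp at hp
        · exact hc h2.1
        · simp at hp
    · rintro ⟨hb, hc⟩
      have hi1 : i - 1 + 1 = i := by omega
      refine ⟨⟨⟨hb, by omega⟩, ⟨hj, hjC⟩⟩, ?_⟩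
      simp only [hi1]
      rw [if_neg (by simp [hcell]), if_pos ⟨hc, hcell⟩]
      simp
  rw [zero_add]
  simp only [m1, m2, m3, m4]
  push_cast
  split_ifs <;> ring

-- A's surroundings loop at an in-range cell, as the same sum of indicators
lemma pvSurr_eq (mm : List (List Int)) (R C i j : Int)
    (hi : 0 ≤ i) (hiR : i < R) (hj : 0 ≤ j) (hjC : j < C) :
    pvSurr mm R C i j =
      (if j + 1 < C ∧ pvCell mm i (j + 1) = 0 then 1 else 0)
      + (if i + 1 < R ∧ pvCell mm (i + 1) j = 0 then 1 else 0)
      + (if 0 ≤ i - 1 ∧ pvCell mm (i - 1) j = 0 then 1 else 0)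
      + (if 0 ≤ j - 1 ∧ pvCell mm i (j - 1) = 0 then 1 else 0) := by
  have c1 : ((0 ≤ i + (0:Int) ∧ i + 0 < R ∧ 0 ≤ j + (1:Int) ∧ j + 1 < C) ∧ pvCell mm (i + 0) (j + 1) = 0)
      ↔ (j + 1 < C ∧ pvCell mm i (j + 1) = 0) := by
    rw [add_zero]; constructor
    · rintro ⟨h1, h2⟩; exact ⟨h1.2.2.2, h2⟩
    · rintro ⟨h1, h2⟩; exact ⟨⟨by omega, by omega, by omega, h1⟩, h2⟩
  have c2 : ((0 ≤ i + (1:Int) ∧ i + 1 < R ∧ 0 ≤ j + (0:Int) ∧ j + 0 < C) ∧ pvCell mm (i + 1) (j + 0) = 0)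
      ↔ (i + 1 < R ∧ pvCell mm (i + 1) j = 0) := by
    rw [add_zero]; constructor
    · rintro ⟨h1, h2⟩; exact ⟨h1.2.1, h2⟩
    · rintro ⟨h1, h2⟩; exact ⟨⟨by omega, by omega, by omega, by omega⟩, h2⟩
  have c3 : ((0 ≤ i + (-1:Int) ∧ i + -1 < R ∧ 0 ≤ j + (0:Int) ∧ j + 0 < C) ∧ pvCell mm (i + -1) (j + 0) = 0)
      ↔ (0 ≤ i - 1 ∧ pvCell mm (i - 1) j = 0) := by
    rw [add_zero, (by ring : i + (-1:Int) = i - 1)]; constructor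
    · rintro ⟨h1, h2⟩; exact ⟨h1.1, h2⟩
    · rintro ⟨h1, h2⟩; exact ⟨⟨h1, by omega, by omega, by omega⟩, h2⟩
  have c4 : ((0 ≤ i + (0:Int) ∧ i + 0 < R ∧ 0 ≤ j + (-1:Int) ∧ j + -1 < C) ∧ pvCell mm (i + 0) (j + -1) = 0)
      ↔ (0 ≤ j - 1 ∧ pvCell mm i (j - 1) = 0) := by
    rw [add_zero, (by ring : j + (-1:Int) = j - 1)]; constructor
    · rintro ⟨h1, h2⟩; exact ⟨h1.2.2.1, h2⟩
    · rintro ⟨h1, h2⟩; exact ⟨⟨by omega, by omega, h1, by omega⟩, h2⟩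
  unfold pvSurr
  simp only [List.foldl_cons, List.foldl_nil, c1, c2, c3, c4]
  split_ifs <;> omega

-- ===== VERDICT (by name: the statement is the Claim_ definition above) =====
theorem find_thin_walls_spec : Claim_equal_find_thin_walls := by
  intro mm _ _
  unfold Spec_find_thin_walls
  show (PySem.List.pyRange 0 (mm.length : Int) 1).foldl (fun acc i =>
      (PySem.List.pyRange 0 ((PySem.List.pyGetD mm 0 []).length : Int) 1).foldl (fun acc j =>
        if pvCell mm i j = 1 then
          if pvSurr mm (mm.length : Int) ((PySem.List.pyGetD mm 0 []).length : Int) i j > 1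
          then acc ++ [(i, j)] else acc
        else acc) acc) []
    = (PySem.List.pyRange 0 (mm.length : Int) 1).foldl (fun acc i =>
      (PySem.List.pyRange 0 ((PySem.List.pyGetD mm 0 []).length : Int) 1).foldl (fun acc j =>
        if pvCell mm i j = 1 ∧
            (pvDictB mm (mm.length : Int) ((PySem.List.pyGetD mm 0 []).length : Int)).getD (i, j) 0 > 1
        then acc ++ [(i, j)] else acc) acc) []
  set R : Int := (mm.length : Int) with hR
  set C : Int := ((PySem.List.pyGetD mm 0 []).length : Int) with hC
  rw [foldl_nested (f := fun (acc : List (Int × Int)) (i j : Int) =>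
        if pvCell mm i j = 1 then
          if pvSurr mm R C i j > 1 then acc ++ [(i, j)] else acc
        else acc)]
  rw [foldl_nested (f := fun (acc : List (Int × Int)) (i j : Int) =>
        if pvCell mm i j = 1 ∧ (pvDictB mm R C).getD (i, j) 0 > 1
        then acc ++ [(i, j)] else acc)]
  apply PySem.List.foldl_congr_mem
  intro acc p hp
  obtain ⟨⟨hi, hiR⟩, hj, hjC⟩ := mem_pvPairs.mp hp
  by_cases hc : pvCell mm p.1 p.2 = 1
  · rw [if_pos hc]
    rw [getD_pvDictB mm R C p.1 p.2 hi hiR hj hjC hc,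
        pvSurr_eq mm R C p.1 p.2 hi hiR hj hjC]
    by_cases hgt : (if p.2 + 1 < C ∧ pvCell mm p.1 (p.2 + 1) = 0 then (1:Int) else 0)
        + (if p.1 + 1 < R ∧ pvCell mm (p.1 + 1) p.2 = 0 then 1 else 0)
        + (if 0 ≤ p.1 - 1 ∧ pvCell mm (p.1 - 1) p.2 = 0 then 1 else 0)
        + (if 0 ≤ p.2 - 1 ∧ pvCell mm p.1 (p.2 - 1) = 0 then 1 else 0) > 1
    · rw [if_pos hgt, if_pos ⟨hc, hgt⟩]
    · rw [if_neg hgt, if_neg (fun h => hgt h.2)]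
  · rw [if_neg hc, if_neg (fun h => hc h.1)]
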